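-- pv_equiv track=rewrite | github.com/SamLee-dedeboy/JT_dashboard | server/routers/linking.py | collect_scenario_children
-- ===== SOURCE A (Python) =====
-- def collect_scenario_children(nodes, node_dict):
--     hierarchy = {}
--     parent_dict = {}
--     for node in nodes:
--         for i in range(1, len(node.split("\\"))):
--             parent = "\\".join(node.split("\\")[:i])
--             child = "\\".join(node.split("\\")[: i + 1])
--             if parent not in hierarchy:
--                 hierarchy[parent] = set()
--             hierarchy[parent].add(child)
--             if child not in hierarchy:
--                 hierarchy[child] = set()
--                 parent_dict[child] = set()
--             parent_dict[child].add(parent)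
--     for node, children in hierarchy.items():
--         node_dict[node]["scenario_children"] = list(children)
--     return node_dict
-- ===== SOURCE B (Python) =====
-- def collect_scenario_children(nodes, node_dict):
--     # One pass per node: split once, build the prefix chain incrementally, flatten
--     # all (parent, child) prefix pairs into one edge list; then a single fold over
--     # the edges builds the hierarchy as a dict whose values are insertion-ordered
--     # child dicts (keys used as an ordered set). No parent_dict bookkeeping.
--     edges = []
--     for node in nodes:
--         parts = node.split("\\")
--         acc = parts[0]
--         for part in parts[1:]:
--             nxt = "\\".join((acc, part))
--             edges.append((acc, nxt))
--             acc = nxt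
--     hierarchy = {}
--     for parent, child in edges:
--         hierarchy.setdefault(parent, {})[child] = None
--         hierarchy.setdefault(child, {})
--     for key, children in hierarchy.items():
--         node_dict[key]["scenario_children"] = list(children)
--     return node_dict
-- ===== Notes on version B (the rewrite author's own statement) =====
-- stated objective: alternative
-- what changed: B splits each path once and builds its prefix chain incrementally (instead of re-splitting and re-joining slices for every i), flattens all (parent, child) prefix pairs into one edge list folded into a hierarchy of insertion-ordered child dicts, and drops the unused parent_dict bookkeeping; Pre_ excludes inputs where a prefix key is missing from node_dict (A raises KeyError) and inputs where some prefix has two or more distinct child prefixes, on which A's list(set) order depends on the interpreter's hash seed.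
import Mathlib
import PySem

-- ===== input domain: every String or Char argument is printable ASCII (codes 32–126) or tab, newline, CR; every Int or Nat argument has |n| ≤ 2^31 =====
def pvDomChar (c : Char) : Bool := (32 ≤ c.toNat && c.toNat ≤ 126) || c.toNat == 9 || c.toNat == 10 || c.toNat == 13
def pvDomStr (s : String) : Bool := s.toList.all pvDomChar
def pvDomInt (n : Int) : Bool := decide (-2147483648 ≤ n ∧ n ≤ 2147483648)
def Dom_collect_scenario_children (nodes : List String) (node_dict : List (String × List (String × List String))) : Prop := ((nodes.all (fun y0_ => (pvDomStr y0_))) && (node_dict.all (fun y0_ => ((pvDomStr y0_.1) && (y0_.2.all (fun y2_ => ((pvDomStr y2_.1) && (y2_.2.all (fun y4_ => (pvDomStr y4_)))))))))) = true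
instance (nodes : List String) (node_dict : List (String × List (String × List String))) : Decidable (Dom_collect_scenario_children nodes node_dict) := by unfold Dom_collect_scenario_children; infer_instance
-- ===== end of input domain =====

-- B replaces A's i-indexed re-split/re-join of every path prefix by one split per node, an
-- incrementally built prefix chain flattened into a single edge list, and drops the unused
-- parent_dict (objective: alternative decomposition). A mutates node_dict in place; the
-- equivalence proved here is about the RETURN value only.

-- ===== PORT A =====
-- Python's node.split("\\") : sep is the non-empty literal "\\", so split? is always `some`
-- and `.getD []` is exact. set() / dict are PySem.Set / PySem.Dict (insertion order).
def collect_scenario_children (nodes : List String) (node_dict : List (String × List (String × List String))) : List (String × List (String × List String)) :=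
  let phase1 := nodes.foldl (fun (st : PySem.Dict String (PySem.Set String) × PySem.Dict String (PySem.Set String)) node =>
      (PySem.List.pyRange 1 ((((PySem.Str.split? node "\\").getD []).length : Int)) 1).foldl (fun st2 i =>
        let parent := PySem.Str.join "\\" (PySem.List.slice ((PySem.Str.split? node "\\").getD []) none (some i))
        let child := PySem.Str.join "\\" (PySem.List.slice ((PySem.Str.split? node "\\").getD []) none (some (i + 1)))
        let h1 := if st2.1.contains parent then st2.1 else st2.1.insert parent PySem.Set.empty
        let h2 := h1.modify parent PySem.Set.empty (fun s => PySem.Set.add s child)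
        let hp := if h2.contains child then (h2, st2.2)
                  else (h2.insert child PySem.Set.empty, st2.2.insert child PySem.Set.empty)
        (hp.1, hp.2.modify child PySem.Set.empty (fun s => PySem.Set.add s parent))) st)
    (PySem.Dict.empty, PySem.Dict.empty)
  -- final loop: node_dict[node]["scenario_children"] = list(children); on a missing key
  -- Python raises KeyError (excluded by Pre_), the port leaves node_dict unchanged there
  (phase1.1.items.foldl (fun (nd : PySem.Dict String (List (String × List String))) kv =>
      match nd.get? kv.1 with
      | some inner => nd.insert kv.1 ((PySem.Dict.mk inner).insert "scenario_children" kv.2).items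
      | none => nd) (PySem.Dict.mk node_dict)).items

-- ===== PORT B =====
-- literal transliteration of Source B: split once, accumulate the prefix chain (parts[0] is
-- parts.headI: split never returns []), flatten edges, build hierarchy as dict-of-dicts
def collect_scenario_children_alt (nodes : List String) (node_dict : List (String × List (String × List String))) : List (String × List (String × List String)) :=
  let edges := nodes.foldl (fun (es : List (String × String)) node =>
      let parts := (PySem.Str.split? node "\\").getD []
      (parts.tail.foldl (fun (st : String × List (String × String)) part =>
          let nxt := PySem.Str.join "\\" [st.1, part]
          (nxt, st.2 ++ [(st.1, nxt)])) (parts.headI, es)).2) []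
  let hierarchy := edges.foldl (fun (h : PySem.Dict String (PySem.Dict String Unit)) e =>
      let h1 := h.setdefault e.1 PySem.Dict.empty
      let h2 := h1.modify e.1 PySem.Dict.empty (fun m => m.insert e.2 ())
      h2.setdefault e.2 PySem.Dict.empty) PySem.Dict.empty
  -- final loop: list(children) is the child dict's keys; missing key = KeyError in Python
  (hierarchy.items.foldl (fun (nd : PySem.Dict String (List (String × List String))) kv =>
      match nd.get? kv.1 with
      | some inner => nd.insert kv.1 ((PySem.Dict.mk inner).insert "scenario_children" kv.2.keys).items
      | none => nd) (PySem.Dict.mk node_dict)).items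

-- ===== PRECONDITION & SPEC =====
-- spec-side copies of the path-prefix decomposition (Pre_ may not reach the ports)
def pvSplit (s : String) : List String := (PySem.Str.split? s "\\").getD []
def pvPrefix (s : String) (j : Nat) : String := PySem.Str.join "\\" ((pvSplit s).take j)
def pvEdgesOf (s : String) : List (String × String) :=
  (List.range ((pvSplit s).length - 1)).map (fun j => (pvPrefix s (j + 1), pvPrefix s (j + 2)))

-- Pre_ excludes (a) inputs where some backslash-prefix of a node is missing from node_dict —
-- there Python A raises KeyError — and (b) inputs where some prefix has two or more distinct
-- child prefixes: there A's list(set) order depends on the interpreter's hash seed, so there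
-- is no single value to match (B returns the children in first-insertion order).
def Pre_collect_scenario_children (nodes : List String) (node_dict : List (String × List (String × List String))) : Prop :=
  (∀ s ∈ nodes, ∀ e ∈ pvEdgesOf s, e.1 ∈ node_dict.map Prod.fst ∧ e.2 ∈ node_dict.map Prod.fst)
  ∧ ((PySem.List.dedup (nodes.flatMap pvEdgesOf)).map Prod.fst).Nodup
instance (nodes : List String) (node_dict : List (String × List (String × List String))) : Decidable (Pre_collect_scenario_children nodes node_dict) := by unfold Pre_collect_scenario_children; infer_instance

def pvWitness_collect_scenario_children : List String × (List (String × List (String × List String))) :=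
  (["a\\b\\c", "x"], [("a", []), ("a\\b", [("k", ["v"])]), ("a\\b\\c", [])])

def Spec_collect_scenario_children (nodes : List String) (node_dict : List (String × List (String × List String))) (out : List (String × List (String × List String))) : Prop := out = collect_scenario_children_alt nodes node_dict
instance (nodes : List String) (node_dict : List (String × List (String × List String))) (out : List (String × List (String × List String))) : Decidable (Spec_collect_scenario_children nodes node_dict out) := by unfold Spec_collect_scenario_children; infer_instance

-- ===== CLAIM (what is proved, stated in full; the proofs are below) =====
def Claim_equal_collect_scenario_children : Prop := ∀ (nodes : List String) (node_dict : List (String × List (String × List String))), Dom_collect_scenario_children nodes node_dict → Pre_collect_scenario_children nodes node_dict → Spec_collect_scenario_children nodes node_dict (collect_scenario_children nodes node_dict)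

-- ===== LEMMAS AND PROOFS =====

def pvHA : Type := PySem.Dict String (PySem.Set String)
def pvHB : Type := PySem.Dict String (PySem.Dict String Unit)
def pvMapH (h : pvHB) : pvHA := PySem.Dict.mk (h.items.map (fun kv => (kv.1, kv.2.keys)))

theorem pv_contains_mapH (h : pvHB) (k : String) : (pvMapH h).contains k = h.contains k := by
  simp only [pvMapH, PySem.Dict.contains, List.any_map]
  rfl

theorem pv_get?_mapH (h : pvHB) (k : String) :
    (pvMapH h).get? k = (h.get? k).map PySem.Dict.keys := by
  simp only [pvMapH, PySem.Dict.get?]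
  rw [List.find?_map]
  cases hf : List.find? (fun p => p.1 == k) h.items with
  | none =>
    have h2 : List.find? ((fun (p : String × PySem.Set String) => p.1 == k) ∘ (fun kv : String × PySem.Dict String Unit => (kv.1, kv.2.keys))) h.items = none := by
      simpa [Function.comp_def] using hf
    simp [h2]
  | some p =>
    have h2 : List.find? ((fun (p : String × PySem.Set String) => p.1 == k) ∘ (fun kv : String × PySem.Dict String Unit => (kv.1, kv.2.keys))) h.items = some p := by
      simpa [Function.comp_def] using hf
    simp [h2]

theorem pv_getD_mapH (h : pvHB) (k : String) :
    (pvMapH h).getD k PySem.Set.empty = (h.getD k PySem.Dict.empty).keys := by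
  simp only [PySem.Dict.getD, pv_get?_mapH]
  cases h.get? k <;> simp [PySem.Set.empty, PySem.Dict.empty, PySem.Dict.keys]

theorem pv_keys_insert_unit (m : PySem.Dict String Unit) (c : String) :
    (m.insert c ()).keys = PySem.Set.add m.keys c := by
  have hc : (PySem.Set.contains m.keys c) = m.contains c := by
    simp only [PySem.Set.contains, PySem.Dict.contains, PySem.Dict.keys, List.any_map,
      ← List.any_beq']
    rfl
  by_cases hm : m.contains c = true
  · rw [PySem.Dict.insert]
    simp only [hm, if_true]
    unfold PySem.Set.add
    rw [hc, hm]
    simp only [if_true]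
    simp only [PySem.Dict.keys, List.map_map]
    refine List.map_congr_left ?_
    intro p _
    by_cases hp : p.1 = c
    · simp [hp]
    · simp [hp]
  · rw [PySem.Dict.insert]
    simp only [hm]
    unfold PySem.Set.add
    rw [hc]
    simp only [Bool.not_eq_true] at hm
    simp [hm, PySem.Dict.keys]

theorem pv_insert_mapH (h : pvHB) (k : String) (v : PySem.Dict String Unit) :
    pvMapH (h.insert k v) = (pvMapH h).insert k v.keys := by
  rw [PySem.Dict.insert, PySem.Dict.insert, pv_contains_mapH]
  by_cases hc : h.contains k = true
  · simp only [hc, if_true]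
    simp only [pvMapH, List.map_map]
    congr 1
    refine List.map_congr_left ?_
    intro p _
    by_cases hp : p.1 = k
    · simp [hp]
    · simp [hp]
  · simp only [hc]
    simp [pvMapH]

def pvStepA (st : pvHA × pvHA) (e : String × String) : pvHA × pvHA :=
  let h1 := if st.1.contains e.1 then st.1 else st.1.insert e.1 PySem.Set.empty
  let h2 := h1.modify e.1 PySem.Set.empty (fun s => PySem.Set.add s e.2)
  let hp := if h2.contains e.2 then (h2, st.2)
            else (h2.insert e.2 PySem.Set.empty, st.2.insert e.2 PySem.Set.empty)
  (hp.1, hp.2.modify e.2 PySem.Set.empty (fun s => PySem.Set.add s e.1))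

def pvStepB (h : pvHB) (e : String × String) : pvHB :=
  let h1 := h.setdefault e.1 PySem.Dict.empty
  let h2 := h1.modify e.1 PySem.Dict.empty (fun m => m.insert e.2 ())
  h2.setdefault e.2 PySem.Dict.empty

theorem pv_keys_empty : (PySem.Dict.empty : PySem.Dict String Unit).keys = PySem.Set.empty := rfl

theorem pv_setdefault_mapH (h : pvHB) (k : String) :
    pvMapH (h.setdefault k PySem.Dict.empty)
      = if (pvMapH h).contains k then pvMapH h else (pvMapH h).insert k PySem.Set.empty := by
  have hsd : h.setdefault k PySem.Dict.empty
      = if h.contains k then h else h.insert k PySem.Dict.empty := by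
    rw [PySem.Dict.setdefault, PySem.Dict.insert]
    by_cases hc : h.contains k = true <;> simp [hc]
  rw [hsd, pv_contains_mapH]
  by_cases hc : h.contains k = true
  · simp [hc]
  · simp only [hc, Bool.false_eq_true, if_false, pv_insert_mapH, pv_keys_empty]

theorem pv_modify_mapH (h : pvHB) (k c : String) :
    pvMapH (h.modify k PySem.Dict.empty (fun m => m.insert c ()))
      = (pvMapH h).modify k PySem.Set.empty (fun s => PySem.Set.add s c) := by
  rw [PySem.Dict.modify, PySem.Dict.modify, pv_insert_mapH, pv_keys_insert_unit, pv_getD_mapH]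

theorem pv_step_fst (h : pvHB) (pd : pvHA) (e : String × String) :
    (pvStepA (pvMapH h, pd) e).1 = pvMapH (pvStepB h e) := by
  unfold pvStepA pvStepB
  simp only
  conv_rhs => rw [pv_setdefault_mapH, pv_modify_mapH, pv_setdefault_mapH]
  split_ifs <;> rfl

theorem pv_fold_fst : ∀ (es : List (String × String)) (h : pvHB) (pd : pvHA),
    (es.foldl pvStepA (pvMapH h, pd)).1 = pvMapH (es.foldl pvStepB h) := by
  intro es
  induction es with
  | nil => intro h pd; rfl
  | cons e es ih =>
    intro h pd
    simp only [List.foldl_cons]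
    have : pvStepA (pvMapH h, pd) e = (pvMapH (pvStepB h e), (pvStepA (pvMapH h, pd) e).2) := by
      refine Prod.ext ?_ rfl
      exact pv_step_fst h pd e
    rw [this, ih]

-- join facts for the backslash-joined prefix chain
theorem pv_joinC_snoc (sep : List Char) (xs : List (List Char)) (y : List Char) (h : xs ≠ []) :
    PySem.Chars.join sep (xs ++ [y]) = PySem.Chars.join sep xs ++ sep ++ y := by
  induction xs with
  | nil => simp at h
  | cons a t ih =>
    cases t with
    | nil => simp [PySem.Chars.join_cons_cons, PySem.Chars.join_singleton]
    | cons b t' =>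
      have h0 : (a :: b :: t') ++ [y] = a :: (b :: (t' ++ [y])) := by simp
      rw [h0, PySem.Chars.join_cons_cons, PySem.Chars.join_cons_cons]
      have h2 := ih (by simp)
      simp only [List.cons_append] at h2
      rw [h2]
      simp [List.append_assoc]

theorem pv_join_single (x : String) : PySem.Str.join "\\" [x] = x := by
  simp [PySem.Str.join, PySem.Chars.join_singleton]

theorem pv_join_snoc (l : List String) (x : String) (h : l ≠ []) :
    PySem.Str.join "\\" (l ++ [x]) = PySem.Str.join "\\" [PySem.Str.join "\\" l, x] := by
  simp only [PySem.Str.join, List.map_append, List.map_cons, List.map_nil, String.toList_ofList]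
  rw [pv_joinC_snoc _ _ _ (by simpa using h), PySem.Chars.join_cons_cons]
  simp [PySem.Chars.join_singleton]

-- the incrementally built edge chain of B, and its closed form
def pvChainEdges (acc : String) : List String → List (String × String)
  | [] => []
  | p :: rest => (acc, PySem.Str.join "\\" [acc, p]) :: pvChainEdges (PySem.Str.join "\\" [acc, p]) rest

theorem pvB_inner : ∀ (rest : List String) (acc : String) (es : List (String × String)),
    (rest.foldl (fun (st : String × List (String × String)) part =>
        let nxt := PySem.Str.join "\\" [st.1, part]
        (nxt, st.2 ++ [(st.1, nxt)])) (acc, es)).2 = es ++ pvChainEdges acc rest := by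
  intro rest
  induction rest with
  | nil => intro acc es; simp [pvChainEdges]
  | cons p rest ih =>
    intro acc es
    simp only [List.foldl_cons, pvChainEdges]
    rw [ih]
    simp

theorem pvChainEdges_spec : ∀ (rest l : List String), l ≠ [] →
    pvChainEdges (PySem.Str.join "\\" l) rest
      = (List.range rest.length).map (fun j =>
          (PySem.Str.join "\\" (l ++ rest.take j), PySem.Str.join "\\" (l ++ rest.take (j + 1)))) := by
  intro rest
  induction rest with
  | nil => intro l _; simp [pvChainEdges]
  | cons r rest ih =>
    intro l hl
    simp only [pvChainEdges]
    rw [← pv_join_snoc l r hl, ih (l ++ [r]) (by simp), List.length_cons, List.range_succ_eq_map]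
    simp only [List.map_cons, List.map_map, Function.comp_def, List.take_zero, List.append_nil,
      List.take_succ_cons, Nat.succ_eq_add_one]
    congr 1
    refine List.map_congr_left ?_
    intro j _
    simp only [← List.append_cons]

-- A's i-th loop iteration handles exactly the j-th prefix edge
theorem pvA_inner (node : String) (st : pvHA × pvHA) :
    (PySem.List.pyRange 1 (((PySem.Str.split? node "\\").getD []).length : Int) 1).foldl (fun st2 i =>
        let parent := PySem.Str.join "\\" (PySem.List.slice ((PySem.Str.split? node "\\").getD []) none (some i))
        let child := PySem.Str.join "\\" (PySem.List.slice ((PySem.Str.split? node "\\").getD []) none (some (i + 1)))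
        let h1 := if st2.1.contains parent then st2.1 else st2.1.insert parent PySem.Set.empty
        let h2 := h1.modify parent PySem.Set.empty (fun s => PySem.Set.add s child)
        let hp := if h2.contains child then (h2, st2.2)
                  else (h2.insert child PySem.Set.empty, st2.2.insert child PySem.Set.empty)
        (hp.1, hp.2.modify child PySem.Set.empty (fun s => PySem.Set.add s parent))) st
      = (pvEdgesOf node).foldl pvStepA st := by
  rw [PySem.List.pyRange_one, List.foldl_map]
  unfold pvEdgesOf
  rw [List.foldl_map]
  have hn : ((((PySem.Str.split? node "\\").getD []).length : Int) - 1).toNat = (pvSplit node).length - 1 := by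
    unfold pvSplit; omega
  rw [hn]
  refine List.foldl_ext _ _ st ?_
  intro st2 j _
  have hp : PySem.Str.join "\\" (PySem.List.slice ((PySem.Str.split? node "\\").getD []) none (some (1 + (j : Int))))
      = pvPrefix node (j + 1) := by
    rw [PySem.List.slice_to _ (by omega : (0:Int) ≤ 1 + (j : Int))]
    have h' : ((1 : Int) + (j : Int)).toNat = j + 1 := by omega
    rw [h']; rfl
  have hc : PySem.Str.join "\\" (PySem.List.slice ((PySem.Str.split? node "\\").getD []) none (some (1 + (j : Int) + 1)))
      = pvPrefix node (j + 2) := by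
    rw [PySem.List.slice_to _ (by omega : (0:Int) ≤ 1 + (j : Int) + 1)]
    have h' : ((1 : Int) + (j : Int) + 1).toNat = j + 2 := by omega
    rw [h']; rfl
  simp only [hp, hc]
  rfl

-- proof-side names for the two ports' phases (each is definitionally its port's phase)
def pvInnerA (st : pvHA × pvHA) (node : String) : pvHA × pvHA :=
  (PySem.List.pyRange 1 (((PySem.Str.split? node "\\").getD []).length : Int) 1).foldl (fun st2 i =>
      let parent := PySem.Str.join "\\" (PySem.List.slice ((PySem.Str.split? node "\\").getD []) none (some i))
      let child := PySem.Str.join "\\" (PySem.List.slice ((PySem.Str.split? node "\\").getD []) none (some (i + 1)))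
      let h1 := if st2.1.contains parent then st2.1 else st2.1.insert parent PySem.Set.empty
      let h2 := h1.modify parent PySem.Set.empty (fun s => PySem.Set.add s child)
      let hp := if h2.contains child then (h2, st2.2)
                else (h2.insert child PySem.Set.empty, st2.2.insert child PySem.Set.empty)
      (hp.1, hp.2.modify child PySem.Set.empty (fun s => PySem.Set.add s parent))) st

def pvBodyB (es : List (String × String)) (node : String) : List (String × String) :=
  let parts := (PySem.Str.split? node "\\").getD []
  (parts.tail.foldl (fun (st : String × List (String × String)) part =>
      let nxt := PySem.Str.join "\\" [st.1, part]
      (nxt, st.2 ++ [(st.1, nxt)])) (parts.headI, es)).2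

def pvFinalA (h : pvHA) (node_dict : List (String × List (String × List String))) : List (String × List (String × List String)) :=
  (h.items.foldl (fun (nd : PySem.Dict String (List (String × List String))) kv =>
      match nd.get? kv.1 with
      | some inner => nd.insert kv.1 ((PySem.Dict.mk inner).insert "scenario_children" kv.2).items
      | none => nd) (PySem.Dict.mk node_dict)).items

def pvFinalB (h : pvHB) (node_dict : List (String × List (String × List String))) : List (String × List (String × List String)) :=
  (h.items.foldl (fun (nd : PySem.Dict String (List (String × List String))) kv =>
      match nd.get? kv.1 with
      | some inner => nd.insert kv.1 ((PySem.Dict.mk inner).insert "scenario_children" kv.2.keys).items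
      | none => nd) (PySem.Dict.mk node_dict)).items

theorem pvBodyB_eq (es : List (String × String)) (node : String) :
    pvBodyB es node = es ++ pvEdgesOf node := by
  unfold pvBodyB
  cases hparts : (PySem.Str.split? node "\\").getD [] with
  | nil =>
    have : pvEdgesOf node = [] := by
      unfold pvEdgesOf pvSplit
      rw [hparts]
      simp
    simp [this]
  | cons p rest =>
    simp only [List.tail_cons, List.headI]
    rw [pvB_inner]
    congr 1
    have hacc : p = PySem.Str.join "\\" [p] := (pv_join_single p).symm
    rw [hacc, pvChainEdges_spec rest [p] (by simp)]
    unfold pvEdgesOf pvSplit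
    rw [hparts]
    simp [List.take_succ_cons, pvPrefix, pvSplit, hparts]

theorem pvFinal_map (h : pvHB) (node_dict : List (String × List (String × List String))) :
    pvFinalA (pvMapH h) node_dict = pvFinalB h node_dict := by
  unfold pvFinalA pvFinalB pvMapH
  rw [show (PySem.Dict.mk (h.items.map (fun kv => (kv.1, kv.2.keys)))).items
        = h.items.map (fun kv => (kv.1, kv.2.keys)) from rfl, List.foldl_map]

theorem pv_ports_eq (nodes : List String) (node_dict : List (String × List (String × List String))) :
    collect_scenario_children nodes node_dict = collect_scenario_children_alt nodes node_dict := by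
  have hA : collect_scenario_children nodes node_dict
      = pvFinalA (nodes.foldl pvInnerA (PySem.Dict.empty, PySem.Dict.empty)).1 node_dict := rfl
  have hB : collect_scenario_children_alt nodes node_dict
      = pvFinalB ((nodes.foldl pvBodyB []).foldl pvStepB PySem.Dict.empty) node_dict := rfl
  rw [hA, hB]
  have h1 : nodes.foldl pvInnerA (PySem.Dict.empty, PySem.Dict.empty)
      = (nodes.flatMap pvEdgesOf).foldl pvStepA (PySem.Dict.empty, PySem.Dict.empty) := by
    rw [List.foldl_flatMap]
    exact List.foldl_ext _ _ _ (fun st node _ => pvA_inner node st)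
  have h2 : nodes.foldl pvBodyB [] = nodes.flatMap pvEdgesOf := by
    rw [List.foldl_ext pvBodyB (fun es node => es ++ pvEdgesOf node) []
      (fun es node _ => pvBodyB_eq es node)]
    simpa using PySem.List.foldl_append_eq_flatMap pvEdgesOf nodes []
  have h3 : ((nodes.flatMap pvEdgesOf).foldl pvStepA ((PySem.Dict.empty : pvHA), (PySem.Dict.empty : pvHA))).1
      = pvMapH ((nodes.flatMap pvEdgesOf).foldl pvStepB PySem.Dict.empty) := by
    have he : (PySem.Dict.empty : pvHA) = pvMapH PySem.Dict.empty := rfl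
    calc ((nodes.flatMap pvEdgesOf).foldl pvStepA ((PySem.Dict.empty : pvHA), (PySem.Dict.empty : pvHA))).1
        = ((nodes.flatMap pvEdgesOf).foldl pvStepA (pvMapH PySem.Dict.empty, (PySem.Dict.empty : pvHA))).1 := by rw [← he]
      _ = pvMapH ((nodes.flatMap pvEdgesOf).foldl pvStepB PySem.Dict.empty) := pv_fold_fst _ _ _
  rw [h1, h2, h3, pvFinal_map]

-- ===== VERDICT (by name: the statement is the Claim_ definition above) =====
theorem collect_scenario_children_spec : Claim_equal_collect_scenario_children := by
  intro nodes node_dict _ _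
  unfold Spec_collect_scenario_children
  exact pv_ports_eq nodes node_dict
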